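-- pv_equiv track=rewrite | github.com/grungi-ankhfire/bruform_django_2024 | tosa/q08.py | is_ancestor_oops
-- ===== SOURCE A (Python) =====
-- def find_ancestors(l,elem):
--     return [arc[0] for arc in l if arc[1]==elem]
--
-- def is_ancestor_oops(l,a,b):
--     ancestors=find_ancestors(l,a)
--     while ancestors:
--         if b in ancestors:
--             return True
--         elem=ancestors.pop()
--         ancestors += find_ancestors(l,elem)
--     return  False
-- ===== SOURCE B (Python) =====
-- def is_ancestor_oops(l, a, b):
--     # Bounded monotone fixpoint iteration: grow the set of ancestors of a until
--     # it stabilises (at most len(l) growth rounds are possible), then test b.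
--     reach = {x for x, y in l if y == a}
--     for _ in range(len(l)):
--         bigger = reach | {x for x, y in l if y in reach}
--         if len(bigger) == len(reach):
--             break
--         reach = bigger
--     return b in reach
-- ===== Notes on version B (the rewrite author's own statement) =====
-- stated objective: alternative
-- what changed: A does a stack-based DFS over ancestor paths with no visited set (exponential blow-up, and it loops forever on cycles reachable from a); B computes the ancestor set by a bounded monotone fixpoint iteration (at most len(l) growth rounds, stopping when the set stabilises) and tests membership, always terminating.
-- outside the precondition, e.g. on is_ancestor_oops([(2, 1), (2, 2)], 1, 2): A returns True, B returns True
import Mathlib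
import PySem

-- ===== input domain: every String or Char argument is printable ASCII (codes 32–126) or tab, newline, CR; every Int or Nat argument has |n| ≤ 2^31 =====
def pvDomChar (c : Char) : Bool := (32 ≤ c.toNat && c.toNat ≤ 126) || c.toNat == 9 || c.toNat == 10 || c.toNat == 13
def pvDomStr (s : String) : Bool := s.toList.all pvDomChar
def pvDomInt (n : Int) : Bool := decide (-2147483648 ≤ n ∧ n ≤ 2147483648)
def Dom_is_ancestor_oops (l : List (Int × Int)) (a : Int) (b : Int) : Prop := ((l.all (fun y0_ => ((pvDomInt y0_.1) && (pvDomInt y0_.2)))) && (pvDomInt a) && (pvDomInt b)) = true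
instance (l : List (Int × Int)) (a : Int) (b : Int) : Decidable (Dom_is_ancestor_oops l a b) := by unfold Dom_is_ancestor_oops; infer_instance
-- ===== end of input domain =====

-- B replaces A's unbounded DFS (no visited set; diverges on reachable cycles) by a bounded
-- monotone fixpoint iteration computing the ancestor set; objective: alternative (B always terminates).


-- ===== PORT A =====
-- find_ancestors(l, elem) = [arc[0] for arc in l if arc[1] == elem]
def findAncestors (l : List (Int × Int)) (elem : Int) : List Int :=
  (l.filter (fun arc => arc.2 == elem)).map (fun arc => arc.1)

-- the while loop of A, with a fuel guard making it total (Python diverges where the fuel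
-- would run out; under Pre_ the fuel below is proved sufficient): each iteration checks
-- `b in ancestors`, pops the LAST element and appends its ancestors.
def loopA (l : List (Int × Int)) (b : Int) : Nat → List Int → Option Bool
  | _, [] => some false
  | 0, _ :: _ => none
  | fuel + 1, x :: xs =>
      if b ∈ (x :: xs) then some true
      else loopA l b fuel
        ((x :: xs).dropLast ++ findAncestors l ((x :: xs).getLast (List.cons_ne_nil x xs)))

def is_ancestor_oops (l : List (Int × Int)) (a : Int) (b : Int) : Bool :=
  (loopA l b ((l.length + 1) ^ (l.length + 2)) (findAncestors l a)).getD false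

-- ===== PORT B =====
-- reach = {x for x, y in l if y == a}
def initReach (l : List (Int × Int)) (a : Int) : PySem.Set Int :=
  PySem.Set.ofList ((l.filter (fun p => p.2 == a)).map (fun p => p.1))

-- reach | {x for x, y in l if y in reach}
def stepReach (l : List (Int × Int)) (r : PySem.Set Int) : PySem.Set Int :=
  PySem.Set.union r
    (PySem.Set.ofList ((l.filter (fun p => PySem.Set.contains r p.2)).map (fun p => p.1)))

-- for _ in range(len(l)): bigger = reach | {…}; if len(bigger) == len(reach): break; reach = bigger
def iterReach (l : List (Int × Int)) : Nat → PySem.Set Int → PySem.Set Int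
  | 0, r => r
  | n + 1, r =>
      if PySem.Set.len (stepReach l r) = PySem.Set.len r then r
      else iterReach l n (stepReach l r)

-- the fully grown ancestor set of a
def ancSet (l : List (Int × Int)) (a : Int) : PySem.Set Int :=
  iterReach l l.length (initReach l a)

def is_ancestor_oops_alt (l : List (Int × Int)) (a : Int) (b : Int) : Bool :=
  PySem.Set.contains (ancSet l a) b

-- ===== PRECONDITION & SPEC =====
-- Pre_ excludes the inputs on which a cycle of ancestor edges is reachable from a: there A's
-- DFS without a visited set loops forever on all but the lucky cases where it meets b before
-- cycling (and on those lucky cases A returns True, the same value B returns). The condition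
-- is a shape condition on the input graph — "no ancestor of a is an ancestor of itself" —
-- stated via ancSet, the standard transitive closure of the edge relation (proved equal to the
-- inductive relation Anc in mem_ancSet below); it does not simulate A's loop.
def Pre_is_ancestor_oops (l : List (Int × Int)) (a : Int) (b : Int) : Prop :=
  ∀ x ∈ ancSet l a, x ∉ ancSet l x
instance (l : List (Int × Int)) (a : Int) (b : Int) : Decidable (Pre_is_ancestor_oops l a b) := by
  unfold Pre_is_ancestor_oops; infer_instance

def pvWitness_is_ancestor_oops : (List (Int × Int)) × Int × Int := ([(2, 1), (3, 2)], 1, 3)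

def Spec_is_ancestor_oops (l : List (Int × Int)) (a : Int) (b : Int) (out : Bool) : Prop :=
  out = is_ancestor_oops_alt l a b
instance (l : List (Int × Int)) (a : Int) (b : Int) (out : Bool) : Decidable (Spec_is_ancestor_oops l a b out) := by
  unfold Spec_is_ancestor_oops; infer_instance

-- ===== CLAIM (what is proved, stated in full; the proofs are below) =====
def Claim_equal_is_ancestor_oops : Prop :=
  ∀ (l : List (Int × Int)) (a : Int) (b : Int), Dom_is_ancestor_oops l a b →
    Pre_is_ancestor_oops l a b → Spec_is_ancestor_oops l a b (is_ancestor_oops l a b)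

-- ===== LEMMAS AND PROOFS =====

-- proof-side helper: the fixpoint iteration without the early stabilisation exit
def iterFull (l : List (Int × Int)) : Nat → PySem.Set Int → PySem.Set Int
  | 0, r => r
  | n + 1, r => iterFull l n (stepReach l r)

-- mathematical ancestor relation: Anc l root x ⇔ x is a (proper) ancestor of root along l
inductive Anc (l : List (Int × Int)) (root : Int) : Int → Prop
  | base {x : Int} : (x, root) ∈ l → Anc l root x
  | step {x y : Int} : (x, y) ∈ l → Anc l root y → Anc l root x

theorem anc_trans {l : List (Int × Int)} {root p b : Int}
    (hp : Anc l root p) (hb : Anc l p b) : Anc l root b := by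
  induction hb with
  | base h => exact Anc.step h hp
  | step h _ ih => exact Anc.step h ih

theorem mem_findAncestors {l : List (Int × Int)} {e x : Int} :
    x ∈ findAncestors l e ↔ (x, e) ∈ l := by
  simp [findAncestors]

theorem anc_unfold {l : List (Int × Int)} {root b : Int} :
    Anc l root b ↔ (b, root) ∈ l ∨ ∃ p, (p, root) ∈ l ∧ Anc l p b := by
  constructor
  · intro h
    induction h with
    | base h => exact Or.inl h
    | step h hy ih =>
      rcases ih with h1 | ⟨p, hp, hpb⟩
      · exact Or.inr ⟨_, h1, Anc.base h⟩
      · exact Or.inr ⟨p, hp, Anc.step h hpb⟩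
  · rintro (h | ⟨p, hp, hpb⟩)
    · exact Anc.base h
    · exact anc_trans (Anc.base hp) hpb

theorem mem_initReach {l : List (Int × Int)} {a x : Int} :
    x ∈ initReach l a ↔ (x, a) ∈ l := by
  simp [initReach, PySem.Set.mem_ofList]

theorem mem_stepReach {l : List (Int × Int)} {r : PySem.Set Int} {x : Int} :
    x ∈ stepReach l r ↔ x ∈ r ∨ ∃ y, (x, y) ∈ l ∧ y ∈ r := by
  simp [stepReach, PySem.Set.mem_union, PySem.Set.mem_ofList]

theorem nodup_stepReach {l : List (Int × Int)} {r : PySem.Set Int} (h : r.Nodup) :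
    (stepReach l r).Nodup := by
  exact PySem.Set.nodup_union _ _ h

theorem subset_stepReach {l : List (Int × Int)} {r : PySem.Set Int} :
    r ⊆ stepReach l r := by
  intro x hx; exact mem_stepReach.mpr (Or.inl hx)

theorem stepReach_elems {l : List (Int × Int)} {r : PySem.Set Int}
    (h : ∀ x ∈ r, x ∈ l.map Prod.fst) : ∀ x ∈ stepReach l r, x ∈ l.map Prod.fst := by
  intro x hx
  rcases mem_stepReach.mp hx with h' | ⟨y, hl, _⟩
  · exact h x h'
  · exact List.mem_map.mpr ⟨(x, y), hl, rfl⟩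

theorem stepReach_eq_of_closed {l : List (Int × Int)} {r : PySem.Set Int}
    (h : ∀ x ∈ stepReach l r, x ∈ r) : stepReach l r = r := by
  have he := PySem.Set.update_eq_append_filter r
      (PySem.Set.ofList ((l.filter (fun p => PySem.Set.contains r p.2)).map (fun p => p.1)))
  have he' : stepReach l r = r ++ List.filter (fun y => !r.contains y)
      (PySem.Set.ofList (PySem.Set.ofList ((l.filter (fun p => PySem.Set.contains r p.2)).map (fun p => p.1)))) := he
  have hnil : List.filter (fun y => !r.contains y)
      (PySem.Set.ofList (PySem.Set.ofList ((l.filter (fun p => PySem.Set.contains r p.2)).map (fun p => p.1)))) = [] := by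
    rw [List.filter_eq_nil_iff]
    intro x hx
    have hxs : x ∈ stepReach l r := by
      rw [PySem.Set.mem_ofList, PySem.Set.mem_ofList] at hx
      refine mem_stepReach.mpr (Or.inr ?_)
      rcases List.mem_map.mp hx with ⟨p, hp, rfl⟩
      rcases List.mem_filter.mp hp with ⟨hpl, hpc⟩
      exact ⟨p.2, hpl, (PySem.Set.contains_iff _ _).mp hpc⟩
    simp [h x hxs]
  rw [he', hnil]; simp

theorem length_lt_stepReach {l : List (Int × Int)} {r : PySem.Set Int}
    (h : ¬ stepReach l r = r) : r.length + 1 ≤ (stepReach l r).length := by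
  have he' : stepReach l r = r ++ List.filter (fun y => !r.contains y)
      (PySem.Set.ofList (PySem.Set.ofList ((l.filter (fun p => PySem.Set.contains r p.2)).map (fun p => p.1)))) :=
    PySem.Set.update_eq_append_filter r _
  rw [he']
  rw [he'] at h
  cases hf : List.filter (fun y => !r.contains y)
      (PySem.Set.ofList (PySem.Set.ofList ((l.filter (fun p => PySem.Set.contains r p.2)).map (fun p => p.1)))) with
  | nil => exact absurd (by rw [hf]; simp) h
  | cons z zs => simp

theorem iterFull_step_comm (l : List (Int × Int)) (n : Nat) (r : PySem.Set Int) :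
    iterFull l n (stepReach l r) = stepReach l (iterFull l n r) := by
  induction n generalizing r with
  | zero => rfl
  | succ n ih => rw [iterFull, iterFull, ih]

theorem iterFull_stable {l : List (Int × Int)} (n : Nat) {r : PySem.Set Int}
    (h : stepReach l r = r) : iterFull l n r = r := by
  induction n with
  | zero => rfl
  | succ n ih => rw [iterFull, h, ih]

theorem stepReach_len_eq_iff {l : List (Int × Int)} {r : PySem.Set Int} :
    PySem.Set.len (stepReach l r) = PySem.Set.len r ↔ stepReach l r = r := by
  constructor
  · intro h
    have he' : stepReach l r = r ++ List.filter (fun y => !r.contains y)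
        (PySem.Set.ofList (PySem.Set.ofList ((l.filter (fun p => PySem.Set.contains r p.2)).map (fun p => p.1)))) :=
      PySem.Set.update_eq_append_filter r _
    have hlen : (stepReach l r).length = r.length := by simpa [PySem.Set.len] using h
    rw [he'] at hlen ⊢
    have : (List.filter (fun y => !r.contains y)
        (PySem.Set.ofList (PySem.Set.ofList ((l.filter (fun p => PySem.Set.contains r p.2)).map (fun p => p.1))))).length = 0 := by
      rw [List.length_append] at hlen
      omega
    rw [List.length_eq_zero_iff] at this
    rw [this]
    simp
  · intro h
    rw [h]

theorem iterReach_eq_iterFull (l : List (Int × Int)) :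
    ∀ (n : Nat) (r : PySem.Set Int), iterReach l n r = iterFull l n r := by
  intro n
  induction n with
  | zero => intro r; rfl
  | succ n ih =>
    intro r
    rw [iterReach, iterFull]
    by_cases h : PySem.Set.len (stepReach l r) = PySem.Set.len r
    · rw [if_pos h]
      have hfix := stepReach_len_eq_iff.mp h
      rw [hfix, iterFull_stable n hfix]
    · rw [if_neg h, ih]

theorem ancSet_eq (l : List (Int × Int)) (a : Int) :
    ancSet l a = iterFull l l.length (initReach l a) :=
  iterReach_eq_iterFull l l.length (initReach l a)

theorem subset_iterFull {l : List (Int × Int)} (n : Nat) {r : PySem.Set Int} :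
    r ⊆ iterFull l n r := by
  induction n generalizing r with
  | zero => exact fun _ hx => hx
  | succ n ih => exact fun _ hx => ih (subset_stepReach hx)

theorem nodup_iterFull {l : List (Int × Int)} (n : Nat) {r : PySem.Set Int} (h : r.Nodup) :
    (iterFull l n r).Nodup := by
  induction n generalizing r with
  | zero => exact h
  | succ n ih => exact ih (nodup_stepReach h)

theorem iterFull_elems {l : List (Int × Int)} (n : Nat) {r : PySem.Set Int}
    (h : ∀ x ∈ r, x ∈ l.map Prod.fst) : ∀ x ∈ iterFull l n r, x ∈ l.map Prod.fst := by
  induction n generalizing r with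
  | zero => exact h
  | succ n ih => exact ih (stepReach_elems h)

theorem iterFull_closed_or_big {l : List (Int × Int)} (n : Nat) (r : PySem.Set Int) :
    stepReach l (iterFull l n r) = iterFull l n r ∨ n + r.length ≤ (iterFull l n r).length := by
  induction n with
  | zero => exact Or.inr (by simp [iterFull])
  | succ n ih =>
    have hstep : iterFull l (n + 1) r = stepReach l (iterFull l n r) := by
      rw [iterFull, iterFull_step_comm]
    by_cases hc : stepReach l (iterFull l n r) = iterFull l n r
    · left; rw [hstep, hc, hc]
    · rcases ih with hcl | hbig
      · exact absurd hcl hc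
      · right; rw [hstep]
        have := length_lt_stepReach hc
        omega

theorem length_le_of_elems {l : List (Int × Int)} {r : PySem.Set Int} (hn : r.Nodup)
    (h : ∀ x ∈ r, x ∈ l.map Prod.fst) : r.length ≤ l.length := by
  have := (List.Nodup.subperm hn (fun _ hx => h _ hx)).length_le
  simpa using this

theorem initReach_elems {l : List (Int × Int)} {a : Int} :
    ∀ x ∈ initReach l a, x ∈ l.map Prod.fst := by
  intro x hx
  exact List.mem_map.mpr ⟨(x, a), mem_initReach.mp hx, rfl⟩

theorem ancSet_elems {l : List (Int × Int)} {a : Int} :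
    ∀ x ∈ ancSet l a, x ∈ l.map Prod.fst := by
  rw [ancSet_eq]
  exact iterFull_elems _ initReach_elems

theorem nodup_ancSet (l : List (Int × Int)) (a : Int) : (ancSet l a).Nodup := by
  rw [ancSet_eq]
  exact nodup_iterFull _ (PySem.Set.nodup_ofList _)

theorem stepReach_nil (l : List (Int × Int)) : stepReach l [] = [] := by
  apply stepReach_eq_of_closed
  intro x hx
  rcases mem_stepReach.mp hx with h | ⟨y, _, hy⟩
  · exact h
  · exact absurd hy (List.not_mem_nil)

theorem ancSet_closed (l : List (Int × Int)) (a : Int) :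
    stepReach l (ancSet l a) = ancSet l a := by
  rw [ancSet_eq]
  rcases iterFull_closed_or_big l.length (initReach l a) with h | h
  · exact h
  · have hle : (iterFull l l.length (initReach l a)).length ≤ l.length :=
      length_le_of_elems (nodup_iterFull _ (PySem.Set.nodup_ofList _))
        (iterFull_elems _ initReach_elems)
    have hinit : initReach l a = [] := by
      cases hi : initReach l a with
      | nil => rfl
      | cons z zs =>
        exfalso
        have h2 := le_trans h hle
        rw [hi] at h2
        simp at h2
    rw [hinit, iterFull_stable _ (stepReach_nil l), stepReach_nil l]

theorem anc_of_mem_iterFull {l : List (Int × Int)} {a : Int} (n : Nat) {r : PySem.Set Int}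
    (h : ∀ z ∈ r, Anc l a z) : ∀ x ∈ iterFull l n r, Anc l a x := by
  induction n generalizing r with
  | zero => exact h
  | succ n ih =>
    refine ih (fun z hz => ?_)
    rcases mem_stepReach.mp hz with h' | ⟨y, hl, hy⟩
    · exact h z h'
    · exact Anc.step hl (h y hy)

theorem mem_ancSet {l : List (Int × Int)} {a x : Int} :
    x ∈ ancSet l a ↔ Anc l a x := by
  rw [ancSet_eq]
  constructor
  · exact fun h => anc_of_mem_iterFull _ (fun z hz => Anc.base (mem_initReach.mp hz)) x h
  · intro h
    induction h with
    | base hx => exact subset_iterFull _ (mem_initReach.mpr hx)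
    | step hl _ ih =>
      rw [← ancSet_eq, ← ancSet_closed l a, ancSet_eq]
      exact mem_stepReach.mpr (Or.inr ⟨_, hl, ih⟩)

theorem ancSet_mono {l : List (Int × Int)} {x p : Int} (hp : (p, x) ∈ l) :
    ancSet l p ⊆ ancSet l x := by
  intro z hz
  exact mem_ancSet.mpr (anc_trans (Anc.base hp) (mem_ancSet.mp hz))

theorem ancRank_le (l : List (Int × Int)) (x : Int) : (ancSet l x).length ≤ l.length :=
  length_le_of_elems (nodup_ancSet l x) ancSet_elems

theorem findAncestors_length_le (l : List (Int × Int)) (e : Int) :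
    (findAncestors l e).length ≤ l.length := by
  simp only [findAncestors, List.length_map]
  exact List.length_filter_le _ _

-- rank: the size of the ancestor set; parents of reachable nodes have strictly smaller rank
theorem ancRank_lt {l : List (Int × Int)} {a x p : Int}
    (hpre : ∀ z ∈ ancSet l a, z ∉ ancSet l z)
    (hx : Anc l a x) (hp : (p, x) ∈ l) :
    (ancSet l p).length < (ancSet l x).length := by
  have hpa : Anc l a p := anc_trans hx (Anc.base hp)
  have hnot : p ∉ ancSet l p := hpre p (mem_ancSet.mpr hpa)
  have hpx : p ∈ ancSet l x := mem_ancSet.mpr (Anc.base hp)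
  have hsub : ancSet l p ⊆ (ancSet l x).erase p := by
    intro z hz
    have hzx : z ∈ ancSet l x := ancSet_mono hp hz
    have hne : z ≠ p := by rintro rfl; exact hnot hz
    exact (List.mem_erase_of_ne hne).mpr hzx
  have hlen : (ancSet l p).length ≤ ((ancSet l x).erase p).length :=
    (List.Nodup.subperm (nodup_ancSet l p) hsub).length_le
  have herase : ((ancSet l x).erase p).length = (ancSet l x).length - 1 :=
    List.length_erase_of_mem hpx
  have hpos : 1 ≤ (ancSet l x).length := List.length_pos_of_mem hpx
  omega

def phi (l : List (Int × Int)) (stack : List Int) : Nat :=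
  (stack.map (fun x => (l.length + 1) ^ (ancSet l x).length)).sum

theorem loopA_correct {l : List (Int × Int)} {a b : Int}
    (hpre : ∀ z ∈ ancSet l a, z ∉ ancSet l z) :
    ∀ (fuel : Nat) (stack : List Int), (∀ x ∈ stack, Anc l a x) → phi l stack < fuel →
      loopA l b fuel stack = some (decide (b ∈ stack ∨ ∃ x ∈ stack, b ∈ ancSet l x)) := by
  intro fuel
  induction fuel with
  | zero =>
    intro stack hst hphi
    cases stack with
    | nil => simp [loopA]
    | cons x xs =>
      exfalso
      have h1 : 1 ≤ (l.length + 1) ^ (ancSet l x).length := Nat.one_le_pow _ _ (by omega)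
      have h2 : (l.length + 1) ^ (ancSet l x).length ≤ phi l (x :: xs) := by
        simp [phi]
      omega
  | succ n ih =>
    intro stack hst hphi
    cases stack with
    | nil => simp [loopA]
    | cons x xs =>
      rw [loopA]
      by_cases hb : b ∈ (x :: xs)
      · simp [hb]
      · rw [if_neg hb]
        have hne := List.cons_ne_nil x xs
        have hsplit : (x :: xs).dropLast ++ [(x :: xs).getLast hne] = x :: xs :=
          List.dropLast_append_getLast hne
        set L := (x :: xs).getLast hne with hLdef
        set D := (x :: xs).dropLast with hDdef
        set P := findAncestors l L with hPdef
        have hLanc : Anc l a L := hst L (List.getLast_mem hne)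
        have hst' : ∀ z ∈ D ++ P, Anc l a z := by
          intro z hz
          rcases List.mem_append.mp hz with hzD | hzP
          · exact hst z (by rw [← hsplit]; exact List.mem_append_left _ hzD)
          · exact anc_trans hLanc (Anc.base (mem_findAncestors.mp hzP))
        have hkey : b ∈ ancSet l L ↔ b ∈ P ∨ ∃ p ∈ P, b ∈ ancSet l p := by
          rw [mem_ancSet, anc_unfold]
          simp [hPdef, mem_findAncestors, mem_ancSet]
        have hP : phi l P < (l.length + 1) ^ (ancSet l L).length := by
          rcases Nat.eq_zero_or_pos (ancSet l L).length with h0 | hpos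
          · have hPnil : P = [] := by
              cases hp : P with
              | nil => rfl
              | cons z zs =>
                exfalso
                have hzP : z ∈ P := by rw [hp]; exact List.mem_cons_self ..
                have := ancRank_lt hpre hLanc (mem_findAncestors.mp hzP)
                omega
            rw [hPnil]
            simp [phi]
          · have hterm : ∀ t ∈ P.map (fun z => (l.length + 1) ^ (ancSet l z).length),
                t ≤ (l.length + 1) ^ ((ancSet l L).length - 1) := by
              intro t ht
              rcases List.mem_map.mp ht with ⟨z, hz, rfl⟩
              have hlt := ancRank_lt hpre hLanc (mem_findAncestors.mp hz)
              exact Nat.pow_le_pow_right (by omega) (by omega)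
            have hsle := List.sum_le_card_nsmul _ _ hterm
            have hlenP : P.length ≤ l.length := findAncestors_length_le l L
            have h1 : phi l P ≤ l.length * (l.length + 1) ^ ((ancSet l L).length - 1) := by
              have : phi l P ≤ P.length * (l.length + 1) ^ ((ancSet l L).length - 1) := by
                simpa [phi, smul_eq_mul] using hsle
              exact le_trans this (Nat.mul_le_mul_right _ hlenP)
            have h2 : l.length * (l.length + 1) ^ ((ancSet l L).length - 1)
                < (l.length + 1) * (l.length + 1) ^ ((ancSet l L).length - 1) :=
              (Nat.mul_lt_mul_right (Nat.pow_pos (by omega))).mpr (by omega)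
            have h3 : (l.length + 1) * (l.length + 1) ^ ((ancSet l L).length - 1)
                = (l.length + 1) ^ (ancSet l L).length := by
              rw [← Nat.pow_succ']
              congr 1
              omega
            omega
        have hphi' : phi l (D ++ P) < n := by
          have hsum : phi l (x :: xs) = phi l D + (l.length + 1) ^ (ancSet l L).length := by
            conv_lhs => rw [← hsplit]
            simp [phi]
          have happ : phi l (D ++ P) = phi l D + phi l P := by
            simp [phi]
          omega
        rw [ih _ hst' hphi']
        simp only [Option.some.injEq, decide_eq_decide]
        have hb2 : b ∉ D ++ [L] := by rw [hsplit]; exact hb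
        constructor
        · rintro (hm | ⟨z, hz, hzanc⟩)
          · rcases List.mem_append.mp hm with h1 | h2
            · exact Or.inl (by rw [← hsplit]; exact List.mem_append_left _ h1)
            · exact Or.inr ⟨L, List.getLast_mem hne, hkey.mpr (Or.inl h2)⟩
          · rcases List.mem_append.mp hz with h1 | h2
            · exact Or.inr ⟨z, by rw [← hsplit]; exact List.mem_append_left _ h1, hzanc⟩
            · exact Or.inr ⟨L, List.getLast_mem hne, hkey.mpr (Or.inr ⟨z, h2, hzanc⟩)⟩
        · rintro (hm | ⟨z, hz, hzanc⟩)
          · exact absurd hm hb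
          · rcases List.mem_append.mp (by rw [hsplit]; exact hz : z ∈ D ++ [L]) with h1 | h2
            · exact Or.inr ⟨z, List.mem_append_left _ h1, hzanc⟩
            · have hzL : z = L := List.mem_singleton.mp h2
              subst hzL
              rcases hkey.mp hzanc with hP1 | ⟨p, hp, hpanc⟩
              · exact Or.inl (List.mem_append_right _ hP1)
              · exact Or.inr ⟨p, List.mem_append_right _ hp, hpanc⟩

-- ===== VERDICT (by name: the statement is the Claim_ definition above) =====
theorem is_ancestor_oops_spec : Claim_equal_is_ancestor_oops := by
  intro l a b _ hpre
  unfold Spec_is_ancestor_oops is_ancestor_oops is_ancestor_oops_alt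
  have hpre' : ∀ z ∈ ancSet l a, z ∉ ancSet l z := hpre
  have hst : ∀ x ∈ findAncestors l a, Anc l a x :=
    fun x hx => Anc.base (mem_findAncestors.mp hx)
  have hphi : phi l (findAncestors l a) < (l.length + 1) ^ (l.length + 2) := by
    have hterm : ∀ t ∈ (findAncestors l a).map (fun z => (l.length + 1) ^ (ancSet l z).length),
        t ≤ (l.length + 1) ^ l.length := by
      intro t ht
      rcases List.mem_map.mp ht with ⟨z, _, rfl⟩
      exact Nat.pow_le_pow_right (by omega) (ancRank_le l z)
    have hsle := List.sum_le_card_nsmul _ _ hterm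
    have h1 : phi l (findAncestors l a) ≤ l.length * (l.length + 1) ^ l.length := by
      have : phi l (findAncestors l a) ≤ (findAncestors l a).length * (l.length + 1) ^ l.length := by
        simpa [phi, smul_eq_mul] using hsle
      exact le_trans this (Nat.mul_le_mul_right _ (findAncestors_length_le l a))
    have h2 : l.length * (l.length + 1) ^ l.length < (l.length + 1) ^ (l.length + 1) := by
      rw [Nat.pow_succ']
      exact (Nat.mul_lt_mul_right (Nat.pow_pos (by omega))).mpr (by omega)
    have h3 : (l.length + 1) ^ (l.length + 1) ≤ (l.length + 1) ^ (l.length + 2) :=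
      Nat.pow_le_pow_right (by omega) (by omega)
    omega
  rw [loopA_correct hpre' _ _ hst hphi]
  rw [Option.getD_some]
  have hiff : (b ∈ findAncestors l a ∨ ∃ x ∈ findAncestors l a, b ∈ ancSet l x)
      ↔ b ∈ ancSet l a := by
    rw [mem_ancSet, anc_unfold]
    simp [mem_findAncestors, mem_ancSet]
  have hcon : PySem.Set.contains (ancSet l a) b = decide (b ∈ ancSet l a) := by
    by_cases hm : b ∈ ancSet l a
    · simp [hm]
    · have hft : ¬ (PySem.Set.contains (ancSet l a) b = true) :=
        fun h => hm ((PySem.Set.contains_iff _ _).mp h)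
      simp only [Bool.not_eq_true] at hft
      simp [hm]
  rw [hcon]
  rw [decide_eq_decide]
  exact hiff
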